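-- pv_equiv track=rewrite | github.com/yxzwang/BoostPFN | findindexes.py | max_indices
-- ===== SOURCE A (Python) =====
-- def max_indices(lista, listb):
--     # 确保两个列表长度相同
--     if len(lista) != len(listb):
--         raise ValueError("两个列表必须具有相同的长度")
--
--     # 将两个列表的索引按元素值的差值进行排序，差值大的排在前面
--     differences = [(i, lista[i] - listb[i]) for i in range(len(lista))]
--     differences.sort(key=lambda x: x[1], reverse=True)
--
--     max_count = 0
--     sum_lista = 0
--     sum_listb = 0
--     indices = []
--
--     # 遍历排序后的差值列表，计算最多的index数目并记录索引
--     for i, diff in differences: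
--         sum_lista += lista[i]
--         sum_listb += listb[i]
--         if sum_lista > sum_listb:
--             max_count += 1
--             indices.append(i)
--         else:
--             break
--     indices.sort()
--     return max_count, indices,differences
-- ===== SOURCE B (Python) =====
-- def max_indices(lista, listb):
--     if len(lista) != len(listb):
--         raise ValueError("两个列表必须具有相同的长度")
--     differences = sorted(((i, a - b) for i, (a, b) in enumerate(zip(lista, listb))),
--                          key=lambda x: x[1], reverse=True)
--     # cumulative sums of the sorted diffs
--     prefix = []
--     t = 0
--     for _, d in differences:
--         t += d
--         prefix.append(t)
--     # Because the diffs are sorted in descending order, the prefix sums are concave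
--     # starting from 0, so "the first k prefix sums are all positive" is a prefix
--     # property of k: binary-search the largest such k instead of scanning.
--     lo, hi = 0, len(prefix)
--     while lo < hi:
--         mid = (lo + hi + 1) // 2
--         if prefix[mid - 1] > 0:
--             lo = mid
--         else:
--             hi = mid - 1
--     max_count = lo
--     indices = sorted(i for i, _ in differences[:max_count])
--     return max_count, indices, differences
-- ===== Notes on version B (the rewrite author's own statement) =====
-- stated objective: alternative
-- what changed: B keeps the mandatory descending stable sort but replaces A's incremental two-sum loop with break by building the cumulative prefix sums and then BINARY-SEARCHING the largest all-positive prefix (valid because the descending sort makes the prefix sums concave), taking indices by slice+sort.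
import Mathlib
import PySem

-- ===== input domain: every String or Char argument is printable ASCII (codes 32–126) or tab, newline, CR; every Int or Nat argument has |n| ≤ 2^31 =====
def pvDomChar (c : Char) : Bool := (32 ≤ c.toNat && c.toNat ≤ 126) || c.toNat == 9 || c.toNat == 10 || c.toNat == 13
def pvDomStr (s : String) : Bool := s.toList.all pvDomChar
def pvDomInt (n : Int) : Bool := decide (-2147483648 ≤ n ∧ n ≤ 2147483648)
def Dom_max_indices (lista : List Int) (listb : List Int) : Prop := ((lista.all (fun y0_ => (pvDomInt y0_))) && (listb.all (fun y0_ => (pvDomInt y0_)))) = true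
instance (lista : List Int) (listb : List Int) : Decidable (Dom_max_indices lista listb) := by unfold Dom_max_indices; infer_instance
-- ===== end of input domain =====

-- B keeps the mandatory descending stable sort of the differences but replaces A's
-- incremental two-sum break loop by cumulative prefix sums followed by a BINARY SEARCH
-- for the largest all-positive prefix (valid since the sorted diffs make the prefix
-- sums concave); objective: alternative decomposition, not speed.

-- ===== PORT A =====
-- A's for-loop with break, as structural recursion over the same state
-- (indexing lista[i]/listb[i] is ported with pyGetD _ _ 0; exact since every i comes
--  from range(len(lista)) and Pre_ gives equal lengths, so the index is in range)
def maxLoopA (lista listb : List Int) (ds : List (Int × Int))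
    (c sa sb : Int) (acc : List Int) : Int × List Int :=
  match ds with
  | [] => (c, acc)
  | (i, _) :: rest =>
    let sa' := sa + PySem.List.pyGetD lista i 0
    let sb' := sb + PySem.List.pyGetD listb i 0
    if sb' < sa' then maxLoopA lista listb rest (c + 1) sa' sb' (acc ++ [i])
    else (c, acc)

def max_indices (lista : List Int) (listb : List Int) : Int × List Int × (List (Int × Int)) :=
  -- the len(lista) != len(listb) ValueError is excluded by Pre_max_indices
  let differences := (PySem.List.pyRange 0 lista.length 1).map
      (fun i => (i, PySem.List.pyGetD lista i 0 - PySem.List.pyGetD listb i 0))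
  let differences := PySem.List.sorted differences (fun x => x.2) true
  let r := maxLoopA lista listb differences 0 0 0 []
  (r.1, PySem.List.sorted r.2 (fun x => x) false, differences)

-- ===== PORT B =====
-- Source B's first loop: the list of cumulative sums of the sorted diffs
def prefixSums (ds : List (Int × Int)) (t : Int) : List Int :=
  match ds with
  | [] => []
  | (_, d) :: rest => (t + d) :: prefixSums rest (t + d)

-- Source B's while-loop: binary search for the largest k with prefix[k-1] > 0.
-- lo and hi are nonnegative Python ints (list indices), so Nat with Nat division
-- is exact for (lo + hi + 1) // 2; prefix[mid-1] is ported with pyGetD at the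
-- nonnegative in-range index mid-1 (1 ≤ mid ≤ hi ≤ len(prefix) in the loop).
def bsearchB (pre : List Int) (lo hi : Nat) : Nat :=
  if lo < hi then
    let mid := (lo + hi + 1) / 2
    if 0 < PySem.List.pyGetD pre ((mid : Int) - 1) 0 then bsearchB pre mid hi
    else bsearchB pre lo (mid - 1)
  else lo
termination_by hi - lo
decreasing_by
  · omega
  · omega

def max_indices_alt (lista : List Int) (listb : List Int) : Int × List Int × (List (Int × Int)) :=
  -- the len(lista) != len(listb) ValueError is excluded by Pre_max_indices
  let differences := PySem.List.sorted
      ((PySem.List.enumerate (lista.zip listb)).map (fun p => (p.1, p.2.1 - p.2.2)))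
      (fun x => x.2) true
  let pre := prefixSums differences 0
  let maxCount := bsearchB pre 0 pre.length
  let indices := PySem.List.sorted ((differences.take maxCount).map Prod.fst) (fun x => x) false
  ((maxCount : Int), indices, differences)

-- ===== PRECONDITION & SPEC =====
-- Pre_ excludes exactly the inputs where Python A raises ValueError (unequal lengths)
def Pre_max_indices (lista : List Int) (listb : List Int) : Prop := lista.length = listb.length
instance (lista : List Int) (listb : List Int) : Decidable (Pre_max_indices lista listb) := by
  unfold Pre_max_indices; infer_instance
def pvWitness_max_indices : List Int × List Int := ([3, 1, -2], [1, 2, 0])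

def Spec_max_indices (lista : List Int) (listb : List Int) (out : Int × List Int × (List (Int × Int))) : Prop := out = max_indices_alt lista listb
instance (lista : List Int) (listb : List Int) (out : Int × List Int × (List (Int × Int))) : Decidable (Spec_max_indices lista listb out) := by unfold Spec_max_indices; infer_instance

-- ===== CLAIM (what is proved, stated in full; the proofs are below) =====
def Claim_equal_max_indices : Prop := ∀ (lista : List Int) (listb : List Int), Dom_max_indices lista listb → Pre_max_indices lista listb → Spec_max_indices lista listb (max_indices lista listb)

-- ===== LEMMAS AND PROOFS =====

-- the two differences lists coincide when the lengths are equal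
lemma differences_eq (lista listb : List Int) (h : lista.length = listb.length) :
    (PySem.List.pyRange 0 lista.length 1).map
      (fun i => (i, PySem.List.pyGetD lista i 0 - PySem.List.pyGetD listb i 0)) =
    (PySem.List.enumerate (lista.zip listb)).map (fun p => (p.1, p.2.1 - p.2.2)) := by
  rw [PySem.List.enumerate_eq_map_pyRange (lista.zip listb) (0, 0), List.map_map]
  have hlen : PySem.List.len (lista.zip listb) = (lista.length : Int) := by
    simp [PySem.List.len, h]
  rw [hlen]
  apply List.map_congr_left
  intro i hi
  rw [PySem.List.mem_pyRange_one] at hi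
  have h0 : 0 ≤ i := hi.1
  have h1 : i < (lista.length : Int) := hi.2
  have hiN : i.toNat < lista.length := by omega
  have hiN' : i.toNat < listb.length := by omega
  have hz : i.toNat < (lista.zip listb).length := by rw [List.length_zip]; omega
  simp only [Function.comp]
  rw [PySem.List.pyGetD_of_nonneg _ _ h0, PySem.List.pyGetD_of_nonneg _ _ h0,
      PySem.List.pyGetD_of_nonneg _ _ h0]
  simp [hiN, hiN', List.getElem_zip]

-- A's break loop computed via prefix sums + findIdx, for any diffs list whose
-- second components are the pointwise lista-listb differences
lemma loopA_eq (lista listb : List Int) (ds : List (Int × Int))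
    (hd : ∀ p ∈ ds, p.2 = PySem.List.pyGetD lista p.1 0 - PySem.List.pyGetD listb p.1 0) :
    ∀ (c sa sb : Int) (acc : List Int),
      maxLoopA lista listb ds c sa sb acc =
        (c + ((prefixSums ds (sa - sb)).findIdx (fun s => decide (s ≤ 0)) : Int),
         acc ++ (ds.take ((prefixSums ds (sa - sb)).findIdx (fun s => decide (s ≤ 0)))).map Prod.fst) := by
  induction ds with
  | nil => intro c sa sb acc; simp [maxLoopA, prefixSums]
  | cons p rest ih =>
    intro c sa sb acc
    obtain ⟨i, d⟩ := p
    have hdi : d = PySem.List.pyGetD lista i 0 - PySem.List.pyGetD listb i 0 :=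
      hd (i, d) (by simp)
    have hsum : (sa + PySem.List.pyGetD lista i 0) - (sb + PySem.List.pyGetD listb i 0)
        = (sa - sb) + d := by rw [hdi]; ring
    by_cases hpos : (sa - sb) + d ≤ 0
    · -- break: first prefix sum non-positive
      have hlt : ¬ sb + PySem.List.pyGetD listb i 0 < sa + PySem.List.pyGetD lista i 0 := by
        omega
      simp [maxLoopA, prefixSums, hlt, List.findIdx, List.findIdx.go, hpos]
    · have hlt : sb + PySem.List.pyGetD listb i 0 < sa + PySem.List.pyGetD lista i 0 := by
        omega
      have hrec := ih (fun q hq => hd q (by simp [hq])) (c + 1)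
        (sa + PySem.List.pyGetD lista i 0) (sb + PySem.List.pyGetD listb i 0) (acc ++ [i])
      rw [hsum] at hrec
      have hfind : (prefixSums ((i, d) :: rest) (sa - sb)).findIdx (fun s => decide (s ≤ 0))
          = (prefixSums rest ((sa - sb) + d)).findIdx (fun s => decide (s ≤ 0)) + 1 := by
        simp [prefixSums, List.findIdx_cons, hpos]
      simp only [maxLoopA, if_pos hlt]
      rw [hrec, hfind]
      simp only [Prod.mk.injEq]
      refine ⟨by push_cast; ring, by simp [List.take_succ_cons]⟩

-- once a cumulative sum is non-positive and all remaining diffs are non-positive,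
-- every later cumulative sum is non-positive
lemma prefixSums_all_nonpos (ds : List (Int × Int)) (t : Int) (ht : t ≤ 0)
    (hd : ∀ p ∈ ds, p.2 ≤ 0) : ∀ x ∈ prefixSums ds t, x ≤ 0 := by
  induction ds generalizing t with
  | nil => simp [prefixSums]
  | cons p rest ih =>
    obtain ⟨i, d⟩ := p
    intro x hx
    have hd0 : d ≤ 0 := hd (i, d) (by simp)
    simp only [prefixSums, List.mem_cons] at hx
    rcases hx with rfl | hx
    · omega
    · exact ih (t + d) (by omega) (fun q hq => hd q (by simp [hq])) x hx

-- with the diffs sorted descending and a non-negative start, every cumulative sum at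
-- or after the first non-positive one is non-positive (concavity of the prefix sums)
lemma prefixSums_nonpos_after (ds : List (Int × Int)) (t : Int) (ht : 0 ≤ t)
    (hsorted : ds.Pairwise (fun a b => b.2 ≤ a.2)) :
    ∀ j (hj : j < (prefixSums ds t).length),
      (prefixSums ds t).findIdx (fun s => decide (s ≤ 0)) ≤ j →
      (prefixSums ds t)[j] ≤ 0 := by
  induction ds generalizing t with
  | nil => simp [prefixSums]
  | cons p rest ih =>
    obtain ⟨i, d⟩ := p
    rw [List.pairwise_cons] at hsorted
    intro j hj hfind
    by_cases hpos : t + d ≤ 0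
    · -- every later diff is ≤ d ≤ -t ≤ 0, so all cumulative sums stay ≤ 0
      have hdnp : ∀ q ∈ rest, q.2 ≤ 0 := fun q hq => by
        have := hsorted.1 q hq; omega
      match j with
      | 0 => simpa [prefixSums] using hpos
      | Nat.succ k =>
        have hk : k < (prefixSums rest (t + d)).length := by
          simpa [prefixSums] using hj
        have hmem : (prefixSums rest (t + d))[k] ∈ prefixSums rest (t + d) :=
          List.getElem_mem hk
        simpa [prefixSums] using
          prefixSums_all_nonpos rest (t + d) hpos hdnp _ hmem
    · have hfind' : (prefixSums ((i, d) :: rest) t).findIdx (fun s => decide (s ≤ 0))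
          = (prefixSums rest (t + d)).findIdx (fun s => decide (s ≤ 0)) + 1 := by
        simp [prefixSums, List.findIdx_cons, hpos]
      rw [hfind'] at hfind
      match j with
      | 0 => omega
      | Nat.succ k =>
        have hk : k < (prefixSums rest (t + d)).length := by
          simpa [prefixSums] using hj
        have := ih (t + d) (by omega) hsorted.2 k hk (by omega)
        simpa [prefixSums] using this
    
-- the binary search of B finds exactly the first non-positive cumulative sum
lemma bsearchB_eq (pre : List Int) (K : Nat)
    (hpos : ∀ j (hj : j < pre.length), j < K → 0 < pre[j])
    (hneg : ∀ j (hj : j < pre.length), K ≤ j → pre[j] ≤ 0) :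
    ∀ n lo hi, hi - lo ≤ n → lo ≤ K → K ≤ hi → hi ≤ pre.length →
      bsearchB pre lo hi = K := by
  intro n
  induction n with
  | zero =>
    intro lo hi hn hlo hhi hlen
    have : ¬ lo < hi := by omega
    unfold bsearchB
    rw [if_neg this]
    omega
  | succ m ih =>
    intro lo hi hn hlo hhi hlen
    by_cases hlt : lo < hi
    · have hmid1 : lo < (lo + hi + 1) / 2 := by omega
      have hmid2 : (lo + hi + 1) / 2 ≤ hi := by omega
      have hidx : (lo + hi + 1) / 2 - 1 < pre.length := by omega
      have hget : PySem.List.pyGetD pre (((lo + hi + 1) / 2 : Nat) - 1) 0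
          = pre[(lo + hi + 1) / 2 - 1] := by
        have hcast : ((((lo + hi + 1) / 2 : Nat) : Int) - 1)
            = (((lo + hi + 1) / 2 - 1 : Nat) : Int) := by omega
        rw [hcast, PySem.List.pyGetD_natCast]
        simp [List.getD, hidx]
      unfold bsearchB
      rw [if_pos hlt]
      simp only [hget]
      by_cases hp : 0 < pre[(lo + hi + 1) / 2 - 1]
      · rw [if_pos hp]
        have hKmid : (lo + hi + 1) / 2 ≤ K := by
          by_contra hc
          have : K ≤ (lo + hi + 1) / 2 - 1 := by omega
          have := hneg _ hidx this
          omega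
        exact ih _ _ (by omega) hKmid hhi hlen
      · rw [if_neg hp]
        have hKmid : K ≤ (lo + hi + 1) / 2 - 1 := by
          by_contra hc
          have := hpos _ hidx (by omega)
          omega
        exact ih _ _ (by omega) hlo hKmid (by omega)
    · unfold bsearchB
      rw [if_neg hlt]
      omega

-- ===== VERDICT (by name: the statement is the Claim_ definition above) =====
theorem max_indices_spec : Claim_equal_max_indices := by
  intro lista listb _ hpre
  have hd : ∀ p ∈ PySem.List.sorted
      ((PySem.List.enumerate (lista.zip listb)).map (fun p => (p.1, p.2.1 - p.2.2)))
      (fun x => x.2) true,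
      p.2 = PySem.List.pyGetD lista p.1 0 - PySem.List.pyGetD listb p.1 0 := by
    intro p hp
    rw [PySem.List.mem_sorted] at hp
    obtain ⟨q, hq, rfl⟩ := List.mem_map.mp hp
    rw [PySem.List.mem_enumerate_iff] at hq
    obtain ⟨k, hk, rfl⟩ := hq
    have hka : k < lista.length := by
      have := hk; simp [List.length_zip] at this; omega
    have hkb : k < listb.length := by
      have := hk; simp [List.length_zip] at this
      unfold Pre_max_indices at hpre; omega
    have h0 : (0 : Int) ≤ 0 + (k : Int) := by positivity
    simp [List.getElem_zip, hka, hkb]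
  set ds := PySem.List.sorted
      ((PySem.List.enumerate (lista.zip listb)).map (fun p => (p.1, p.2.1 - p.2.2)))
      (fun x => x.2) true with hds
  have hloop := loopA_eq lista listb ds hd 0 0 0 []
  simp only [sub_self] at hloop
  -- K is the first non-positive cumulative sum; B's binary search returns it too
  set P := prefixSums ds 0 with hP
  set K := P.findIdx (fun s => decide (s ≤ 0)) with hK
  have hsorted : ds.Pairwise (fun a b => b.2 ≤ a.2) :=
    PySem.List.sorted_pairwise_rev _ _
  have hpos : ∀ j (hj : j < P.length), j < K → 0 < P[j] := by
    intro j hj hjK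
    have := List.not_of_lt_findIdx (p := fun s => decide (s ≤ 0)) (xs := P) hjK
    simp at this
    omega
  have hneg : ∀ j (hj : j < P.length), K ≤ j → P[j] ≤ 0 := fun j hj hKj =>
    prefixSums_nonpos_after ds 0 le_rfl hsorted j hj hKj
  have hbs : bsearchB P 0 P.length = K :=
    bsearchB_eq P K hpos hneg P.length 0 P.length (by omega) (by omega)
      (List.findIdx_le_length) le_rfl
  simp only [Spec_max_indices, max_indices, max_indices_alt]
  rw [differences_eq lista listb hpre]
  rw [← hds, ← hP, hbs, hloop]
  simp
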